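-- pv_equiv track=rewrite | github.com/ranajikrishna/private | codes_algo/code_python/codility/reverseWords.py | solution
-- ===== SOURCE A (Python) =====
-- def solution(S):
--
-- 	N = len(S)
--
-- 	if (N == 1):
-- 		return (0)
-- 	elif (N % 2 == 0):
-- 		return(-1)
-- 	else:
-- 		mid = N//2
-- 		for i in range(1, mid+1):
-- 			if(S[mid - i] != S[mid + i]):
-- 				return(-1)
-- 			else: pass
-- 	return(mid)
-- ===== SOURCE B (Python) =====
-- def solution(S):
--     N = len(S)
--     if N % 2 == 1 and S == S[::-1]:
--         return N // 2
--     return -1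
-- ===== Notes on version B (the rewrite author's own statement) =====
-- stated objective: idiomatic
-- what changed: Replaces the explicit center-out two-pointer index loop with a single whole-string reversed comparison guarded by an odd-length test.
import Mathlib
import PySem

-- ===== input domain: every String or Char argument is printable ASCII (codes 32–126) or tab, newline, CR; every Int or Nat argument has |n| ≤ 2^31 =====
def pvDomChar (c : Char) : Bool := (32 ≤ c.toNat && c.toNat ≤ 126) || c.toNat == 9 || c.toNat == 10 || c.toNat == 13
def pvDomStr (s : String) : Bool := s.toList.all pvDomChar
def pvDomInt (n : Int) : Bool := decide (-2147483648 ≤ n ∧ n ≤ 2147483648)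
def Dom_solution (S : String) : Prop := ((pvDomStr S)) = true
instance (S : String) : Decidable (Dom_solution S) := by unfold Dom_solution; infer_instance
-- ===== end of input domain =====

-- B replaces A's center-out two-pointer loop by an odd-length guard plus a whole-string
-- reversed comparison (idiomatic; same cost).

-- ===== PORT A =====
-- the 'for i in range(1, mid+1)' loop with its early 'return -1'
def solLoopA (l : List Char) (mid : Int) : List Int → Int
  | [] => mid
  | i :: rest =>
      if PySem.List.pyGet? l (mid - i) ≠ PySem.List.pyGet? l (mid + i) then -1
      else solLoopA l mid rest

def solution (S : String) : Int :=
  let N : Int := (S.toList.length : Int)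
  if N = 1 then 0
  else if PySem.Int.mod N 2 = 0 then -1
  else
    let mid := PySem.Int.floordiv N 2
    solLoopA S.toList mid (PySem.List.pyRange 1 (mid + 1) 1)

-- ===== PORT B =====
def solution_alt (S : String) : Int :=
  let l := S.toList
  if l.length % 2 = 1 ∧ l = l.reverse then ((l.length / 2 : Nat) : Int) else -1

-- ===== PRECONDITION & SPEC =====
def Spec_solution (S : String) (out : Int) : Prop := out = solution_alt S
instance (S : String) (out : Int) : Decidable (Spec_solution S out) := by unfold Spec_solution; infer_instance

-- ===== CLAIM (what is proved, stated in full; the proofs are below) =====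
def Claim_equal_solution : Prop := ∀ (S : String), Dom_solution S → Spec_solution S (solution S)

-- ===== LEMMAS AND PROOFS =====

theorem solLoopA_eq_if (l : List Char) (mid : Int) (L : List Int) :
    solLoopA l mid L =
      if ∀ i ∈ L, PySem.List.pyGet? l (mid - i) = PySem.List.pyGet? l (mid + i) then mid
      else -1 := by
  induction L with
  | nil => simp [solLoopA]
  | cons i rest ih =>
      by_cases h : PySem.List.pyGet? l (mid - i) = PySem.List.pyGet? l (mid + i)
      · simp [solLoopA, h, ih]
      · simp [solLoopA, h]

-- odd-length palindrome characterisation via the paired indices around the center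
theorem pairs_iff_palindrome (l : List Char) (m : Nat) (hn : l.length = 2 * m + 1) :
    (∀ i : Int, 1 ≤ i → i < (m : Int) + 1 →
        PySem.List.pyGet? l ((m : Int) - i) = PySem.List.pyGet? l ((m : Int) + i)) ↔
      l = l.reverse := by
  constructor
  · intro h
    apply List.ext_getElem?
    intro j
    by_cases hj : j < l.length
    · rw [List.getElem?_reverse hj]
      have hj' : j < 2 * m + 1 := by omega
      have e3 : l.length - 1 - j = 2 * m - j := by omega
      rw [e3]
      rcases Nat.lt_trichotomy j m with hjm | hjm | hjm
      · have := h ((m : Int) - (j : Int)) (by omega) (by omega)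
        have e1 : (m : Int) - ((m : Int) - (j : Int)) = (j : Int) := by ring
        have e2 : (m : Int) + ((m : Int) - (j : Int)) = ((2 * m - j : Nat) : Int) := by
          push_cast [Nat.cast_sub (by omega : j ≤ 2 * m)]; ring
        rw [e1, e2] at this
        rw [PySem.List.pyGet?_natCast, PySem.List.pyGet?_natCast] at this
        exact this
      · subst hjm
        congr 1
        omega
      · have := h ((j : Int) - (m : Int)) (by omega) (by omega)
        have e1 : (m : Int) - ((j : Int) - (m : Int)) = ((2 * m - j : Nat) : Int) := by
          push_cast [Nat.cast_sub (by omega : j ≤ 2 * m)]; ring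
        have e2 : (m : Int) + ((j : Int) - (m : Int)) = (j : Int) := by ring
        rw [e1, e2] at this
        rw [PySem.List.pyGet?_natCast, PySem.List.pyGet?_natCast] at this
        exact this.symm
    · have h1 : l[j]? = none := List.getElem?_eq_none (by omega)
      have h2 : l.reverse[j]? = none := List.getElem?_eq_none (by simp; omega)
      rw [h1, h2]
  · intro hpal i hi1 hi2
    have hi : i = ((i.toNat : Nat) : Int) := by omega
    set k := i.toNat with hk
    have hk1 : 1 ≤ k := by omega
    have hk2 : k ≤ m := by omega
    have e1 : (m : Int) - i = ((m - k : Nat) : Int) := by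
      push_cast [Nat.cast_sub hk2]; omega
    have e2 : (m : Int) + i = ((m + k : Nat) : Int) := by push_cast; omega
    rw [e1, e2, PySem.List.pyGet?_natCast, PySem.List.pyGet?_natCast]
    conv_lhs => rw [hpal]
    rw [List.getElem?_reverse (by omega)]
    congr 1
    omega

theorem solution_eq (S : String) : solution S = solution_alt S := by
  unfold solution solution_alt
  set l := S.toList with hl
  by_cases h1 : (l.length : Int) = 1
  · -- length 1: a single char is its own reverse
    have hlen : l.length = 1 := by omega
    obtain ⟨a, ha⟩ := List.length_eq_one_iff.mp hlen
    simp [ha]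
  · by_cases h2 : l.length % 2 = 0
    · -- even length: both sides -1
      have hm : PySem.Int.mod (l.length : Int) 2 = 0 := by
        rw [PySem.Int.mod_eq_emod_of_pos (by omega)]
        omega
      rw [if_neg h1, if_pos hm, if_neg (by simp [h2])]
    · -- odd length ≥ 3
      have hodd : l.length % 2 = 1 := by omega
      obtain ⟨m, hm⟩ : ∃ m, l.length = 2 * m + 1 := ⟨l.length / 2, by omega⟩
      have hmod : PySem.Int.mod (l.length : Int) 2 ≠ 0 := by
        rw [PySem.Int.mod_eq_emod_of_pos (by omega)]
        omega
      have hfd : PySem.Int.floordiv (l.length : Int) 2 = (m : Int) := by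
        rw [PySem.Int.floordiv_eq_ediv_of_pos (by omega)]
        omega
      rw [if_neg h1, if_neg hmod, hfd, solLoopA_eq_if]
      have hdiv : l.length / 2 = m := by omega
      by_cases hp : l = l.reverse
      · rw [if_pos, if_pos ⟨hodd, hp⟩, hdiv]
        intro i hi
        rw [PySem.List.mem_pyRange_one] at hi
        exact (pairs_iff_palindrome l m hm).mpr hp i hi.1 hi.2
      · rw [if_neg, if_neg (by tauto)]
        intro hall
        exact hp ((pairs_iff_palindrome l m hm).mp
          (fun i hi1 hi2 => hall i (PySem.List.mem_pyRange_one.mpr ⟨hi1, hi2⟩)))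

-- ===== VERDICT (by name: the statement is the Claim_ definition above) =====
theorem solution_spec : Claim_equal_solution := by
  intro S _
  exact solution_eq S
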